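-- pv_equiv track=rewrite | github.com/LogeshwariSenthilkumar/Python_Practice | code45.py | largesmall
-- ===== SOURCE A (Python) =====
-- def largesmall(arr,n):
--     evenlist=[]
--     oddlist=[]
--     if(n==0):
--         return 0
--     else:
--         for i in range(0,n,2):
--             evenlist.append(arr[i])
--         sortevenlist=sorted(evenlist)
--         for i in range(1,n,2):
--             oddlist.append(arr[i])
--         sortoddlist=sorted(oddlist)
--         sum=sortevenlist[len(evenlist)-2]+sortoddlist[len(oddlist)-2]
--         return sum
-- ===== SOURCE B (Python) =====
-- def largesmall(arr, n):
--     if n == 0: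
--         return 0
--     e1 = e2 = None
--     for i in range(0, n, 2):
--         x = arr[i]
--         if e1 is None or x >= e1:
--             e1, e2 = x, e1
--         elif e2 is None or x > e2:
--             e2 = x
--     o1 = o2 = None
--     for i in range(1, n, 2):
--         x = arr[i]
--         if o1 is None or x >= o1:
--             o1, o2 = x, o1
--         elif o2 is None or x > o2:
--             o2 = x
--     return (e1 if e2 is None else e2) + (o1 if o2 is None else o2)
-- ===== Notes on version B (the rewrite author's own statement) =====
-- stated objective: faster
-- what changed: Instead of building even/odd-index lists and sorting each to index the second-from-top, B makes one linear scan per parity class keeping only the two largest values seen (falling back to the single largest when the class has one element, matching A's [-1] wrap).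
import Mathlib
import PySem

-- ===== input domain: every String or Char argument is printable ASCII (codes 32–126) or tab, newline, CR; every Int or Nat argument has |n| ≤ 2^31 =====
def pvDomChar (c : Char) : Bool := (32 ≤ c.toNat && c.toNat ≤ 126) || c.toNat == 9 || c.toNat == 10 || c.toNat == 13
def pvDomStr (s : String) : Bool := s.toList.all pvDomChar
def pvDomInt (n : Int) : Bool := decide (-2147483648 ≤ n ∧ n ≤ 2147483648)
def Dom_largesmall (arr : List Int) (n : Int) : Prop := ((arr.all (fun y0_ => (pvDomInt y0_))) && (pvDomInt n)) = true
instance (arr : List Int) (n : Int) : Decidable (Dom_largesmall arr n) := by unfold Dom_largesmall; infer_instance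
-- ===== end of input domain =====

-- B replaces A's build-two-lists-then-sort with a single linear scan keeping the two largest
-- values per parity class (objective: faster); same return value on every input in Pre_.

-- ===== PORT A =====
-- literal transliteration of Source A: two append loops, sorted(), index len-2 (Python -1 wrap when a class has one element)
def largesmall (arr : List Int) (n : Int) : Int :=
  if n = 0 then 0
  else
    PySem.List.pyGetD
      (PySem.List.sorted
        ((PySem.List.pyRange 0 n 2).foldl (fun acc i => acc ++ [PySem.List.pyGetD arr i 0]) [])
        (fun x => x) false)
      ((((PySem.List.pyRange 0 n 2).foldl (fun acc i => acc ++ [PySem.List.pyGetD arr i 0]) []).length : Int) - 2) 0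
    +
    PySem.List.pyGetD
      (PySem.List.sorted
        ((PySem.List.pyRange 1 n 2).foldl (fun acc i => acc ++ [PySem.List.pyGetD arr i 0]) [])
        (fun x => x) false)
      ((((PySem.List.pyRange 1 n 2).foldl (fun acc i => acc ++ [PySem.List.pyGetD arr i 0]) []).length : Int) - 2) 0

-- ===== PORT B =====
-- Source B's loop body: state = (largest so far, second largest so far), none = absent
def pvStep : Option Int × Option Int → Int → Option Int × Option Int
  | (none, _), x => (some x, none)
  | (some m1, b2), x =>
    if m1 ≤ x then (some x, some m1)
    else
      match b2 with
      | none => (some m1, some x)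
      | some m2 => if m2 < x then (some m1, some x) else (some m1, some m2)

-- Source B's final '(e1 if e2 is None else e2)'
def pvPick : Option Int × Option Int → Int
  | (b1, none) => b1.getD 0
  | (_, some m2) => m2

def largesmall_alt (arr : List Int) (n : Int) : Int :=
  if n = 0 then 0
  else
    pvPick ((PySem.List.pyRange 0 n 2).foldl
      (fun s i => pvStep s (PySem.List.pyGetD arr i 0)) (none, none))
    +
    pvPick ((PySem.List.pyRange 1 n 2).foldl
      (fun s i => pvStep s (PySem.List.pyGetD arr i 0)) (none, none))

-- ===== PRECONDITION & SPEC =====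
-- Pre_ excludes exactly the inputs where Python A raises IndexError: n = 1 and n < 0 leave a
-- parity class empty (its [-2] lookup fails), and n > len(arr) makes arr[i] fail.
def Pre_largesmall (arr : List Int) (n : Int) : Prop :=
  n = 0 ∨ (2 ≤ n ∧ n ≤ (arr.length : Int))
instance (arr : List Int) (n : Int) : Decidable (Pre_largesmall arr n) := by
  unfold Pre_largesmall; infer_instance

def pvWitness_largesmall : List Int × Int := ([3, 1, 4, 1, 5, 9], 6)

def Spec_largesmall (arr : List Int) (n : Int) (out : Int) : Prop := out = largesmall_alt arr n
instance (arr : List Int) (n : Int) (out : Int) : Decidable (Spec_largesmall arr n out) := by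
  unfold Spec_largesmall; infer_instance

-- ===== CLAIM (what is proved, stated in full; the proofs are below) =====
def Claim_equal_largesmall : Prop := ∀ (arr : List Int) (n : Int),
  Dom_largesmall arr n → Pre_largesmall arr n → Spec_largesmall arr n (largesmall arr n)

-- ===== LEMMAS AND PROOFS =====

-- pvStep is right-commutative on every state, so the fold is permutation-invariant
lemma pvStep_comm (s : Option Int × Option Int) (x y : Int) :
    pvStep (pvStep s x) y = pvStep (pvStep s y) x := by
  obtain ⟨b1, b2⟩ := s
  rcases b1 with _ | m1 <;> rcases b2 with _ | m2 <;>
    repeat' (first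
      | rfl
      | omega
      | (exact ⟨trivial, by omega⟩)
      | split_ifs
      | simp_all only [pvStep, Prod.mk.injEq, Option.some.injEq])

-- folding pvStep over a (≤)-sorted list yields its last two elements
lemma fold_sorted (s : List Int) (hpw : s.Pairwise (· ≤ ·)) :
    s.foldl pvStep (none, none) = (s.reverse[0]?, s.reverse[1]?) := by
  induction s using List.reverseRecOn with
  | nil => rfl
  | append_singleton t x ih =>
    rw [List.foldl_append, List.foldl_cons, List.foldl_nil]
    have hpt : t.Pairwise (· ≤ ·) := hpw.sublist (List.sublist_append_left t [x])
    have hle : ∀ a ∈ t, a ≤ x := fun a ha =>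
      (List.pairwise_append.mp hpw).2.2 a ha x (List.mem_singleton_self x)
    rw [ih hpt]
    cases ht : t.reverse with
    | nil =>
      have : t = [] := by simpa using congrArg List.reverse ht
      subst this; rfl
    | cons h rest =>
      have hmem : h ∈ t := by
        have : h ∈ t.reverse := by rw [ht]; exact List.mem_cons_self
        simpa using this
      simp only [List.getElem?_cons_zero, List.getElem?_cons_succ, pvStep]
      rw [if_pos (hle h hmem)]
      simp [List.reverse_append, ht]

-- picking from the tracker = the sorted list's [len-2] (Python index, wrapping to -1)
lemma sortedFold (s : List Int) (hpw : s.Pairwise (· ≤ ·)) :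
    PySem.List.pyGetD s ((s.length : Int) - 2) 0 = pvPick (s.foldl pvStep (none, none)) := by
  rw [fold_sorted s hpw]
  rcases s with _ | ⟨a, _ | ⟨b, rest⟩⟩
  · rfl
  · rfl
  · have hl : (a :: b :: rest).length = rest.length + 2 := by simp
    have h0 : (0:Int) ≤ (((a :: b :: rest).length : Int)) - 2 := by omega
    have h1 : (((a :: b :: rest).length : Int)) - 2 < (((a :: b :: rest).length : Int)) := by omega
    rw [PySem.List.pyGetD_eq_getElem _ 0 h0 h1]
    have h1r : 1 < (a :: b :: rest).reverse.length := by simp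
    rw [List.getElem?_eq_getElem h1r]
    simp only [pvPick]
    rw [List.getElem_reverse]
    congr 1
    simp
    omega

-- the tracker computes the sorted list's second-from-top for ANY list
lemma tracker_eq (l : List Int) :
    PySem.List.pyGetD (PySem.List.sorted l (fun x => x) false) ((l.length : Int) - 2) 0
      = pvPick (l.foldl pvStep (none, none)) := by
  have hperm : (PySem.List.sorted l (fun x => x) false).Perm l :=
    PySem.List.sorted_perm l (fun x => x) false
  have hfold : l.foldl pvStep (none, none)
      = (PySem.List.sorted l (fun x => x) false).foldl pvStep (none, none) :=
    (hperm.foldl_eq' (fun x _ y _ z => pvStep_comm z x y) _).symm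
  have hlen : (PySem.List.sorted l (fun x => x) false).length = l.length := hperm.length_eq
  have hpw : (PySem.List.sorted l (fun x => x) false).Pairwise (· ≤ ·) := by
    simpa using PySem.List.sorted_pairwise l (fun x => x)
  rw [hfold, ← hlen]
  exact sortedFold _ hpw

-- ===== VERDICT (by name: the statement is the Claim_ definition above) =====
theorem largesmall_spec : Claim_equal_largesmall := by
  unfold Claim_equal_largesmall
  intro arr n _ _
  unfold Spec_largesmall largesmall largesmall_alt
  by_cases h : n = 0
  · simp [h]
  · simp only [if_neg h]
    rw [PySem.List.foldl_append_singleton_eq_map, PySem.List.foldl_append_singleton_eq_map]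
    simp only [List.nil_append]
    have hB : ∀ r : List Int,
        r.foldl (fun s i => pvStep s (PySem.List.pyGetD arr i 0)) (none, none)
          = ((r.map (fun i => PySem.List.pyGetD arr i 0)).foldl pvStep (none, none)) :=
      fun r => List.foldl_map.symm
    rw [hB, hB, ← tracker_eq, ← tracker_eq]
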